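-- pv_equiv track=rewrite | github.com/cloudchamb3r/aoc2024 | disk_fragmenter.py | create_block_map
-- ===== SOURCE A (Python) =====
-- def create_block_map(l: list[int]) -> list[int]:
--     ret = []
--     free = False
--     bid = 0
--     for e in l:
--         if free: ret.extend([-1] * e)
--         else:
--             ret.extend([bid] * e)
--             bid+=1
--         free = not free
--     return ret
-- ===== SOURCE B (Python) =====
-- def create_block_map(l: list[int]) -> list[int]:
--     # Output-driven reconstruction: precompute clamped run sizes and the total
--     # block count, then walk output positions with a run pointer (two pointers),
--     # instead of expanding each input run in turn with a toggle and a counter.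
--     sizes = [e if e > 0 else 0 for e in l]
--     total = 0
--     for s in sizes:
--         total += s
--     out = []
--     r = -1          # index of the run currently being emitted
--     fill = 0        # blocks of run r still to emit
--     for _ in range(total):
--         while fill == 0:
--             r += 1
--             fill = sizes[r]
--         out.append(-1 if r % 2 else r // 2)
--         fill -= 1
--     return out
-- ===== Notes on version B (the rewrite author's own statement) =====
-- stated objective: alternative
-- what changed: Replaces input-driven run expansion with a mutable free-toggle and file-id counter by an output-driven two-pointer reconstruction: clamped run sizes and the total block count are precomputed, then each output position is filled by advancing a run pointer.
import Mathlib
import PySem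

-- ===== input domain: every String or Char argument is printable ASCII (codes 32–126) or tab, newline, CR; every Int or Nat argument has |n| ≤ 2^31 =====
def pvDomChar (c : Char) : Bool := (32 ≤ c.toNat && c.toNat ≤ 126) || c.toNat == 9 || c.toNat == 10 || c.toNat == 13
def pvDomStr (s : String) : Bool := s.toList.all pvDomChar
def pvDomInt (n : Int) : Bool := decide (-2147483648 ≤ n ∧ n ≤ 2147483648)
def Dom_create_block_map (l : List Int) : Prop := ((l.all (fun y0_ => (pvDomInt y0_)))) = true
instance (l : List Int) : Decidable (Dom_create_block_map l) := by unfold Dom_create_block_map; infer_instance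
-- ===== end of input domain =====

-- B replaces A's input-driven run expansion (mutable free-toggle + file-id counter)
-- by an output-driven two-pointer reconstruction: precompute clamped run sizes and
-- the total block count, then fill each output position by advancing a run pointer.

-- ===== PORT A =====
def create_block_map (l : List Int) : List Int :=
  (l.foldl
    (fun (s : List Int × Bool × Int) e =>
      if s.2.1 then (s.1 ++ PySem.List.pyRepeat [(-1 : Int)] e, !s.2.1, s.2.2)
      else (s.1 ++ PySem.List.pyRepeat [s.2.2] e, !s.2.1, s.2.2 + 1))
    ([], false, 0)).1

-- ===== PORT B =====
-- the inner `while fill == 0: r += 1; fill = sizes[r]` loop; fuel = sizes.length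
-- bounds the skips (exact: when fuel runs out or the index is out of range Python
-- would raise IndexError, which the enclosing loop's invariant makes unreachable)
def pvSkipB (sizes : List Int) : Int → Nat → Int × Int
  | r, 0 => (r, 0)
  | r, fuel + 1 =>
    match PySem.List.pyGet? sizes (r + 1) with
    | none => (r + 1, 0)
    | some v => if v = 0 then pvSkipB sizes (r + 1) fuel else (r + 1, v)

-- one iteration of B's `for _ in range(total)` body, state = (out, r, fill)
def pvStepB (sizes : List Int) (s : List Int × Int × Int) : List Int × Int × Int :=
  let rf := if s.2.2 = 0 then pvSkipB sizes s.2.1 sizes.length else (s.2.1, s.2.2)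
  (s.1 ++ [if PySem.Int.mod rf.1 2 ≠ 0 then (-1 : Int) else PySem.Int.floordiv rf.1 2],
   rf.1, rf.2 - 1)

def create_block_map_alt (l : List Int) : List Int :=
  let sizes := l.map (fun e => if e > 0 then e else 0)
  let total := sizes.foldl (· + ·) 0
  ((PySem.List.pyRange 0 total 1).foldl (fun s _ => pvStepB sizes s) ([], -1, 0)).1

-- ===== PRECONDITION & SPEC =====
def Spec_create_block_map (l : List Int) (out : List Int) : Prop := out = create_block_map_alt l
instance (l : List Int) (out : List Int) : Decidable (Spec_create_block_map l out) := by unfold Spec_create_block_map; infer_instance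

-- ===== CLAIM (what is proved, stated in full; the proofs are below) =====
def Claim_equal_create_block_map : Prop := ∀ (l : List Int), Dom_create_block_map l → Spec_create_block_map l (create_block_map l)

-- ===== LEMMAS AND PROOFS =====

-- reference expansion indexed from i: the blocks contributed by the runs from index i on
def pvRuns : Nat → List Int → List Int
  | _, [] => []
  | i, e :: rest =>
    List.replicate e.toNat (if i % 2 = 1 then (-1 : Int) else ((i / 2 : Nat) : Int)) ++ pvRuns (i + 1) rest

def pvClamp (e : Int) : Int := if e > 0 then e else 0

def pvS (xs : List Int) : Int := (xs.map pvClamp).sum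

theorem pvA_loop (l : List Int) : ∀ (i : Nat) (ret : List Int),
    (l.foldl
      (fun (s : List Int × Bool × Int) e =>
        if s.2.1 then (s.1 ++ PySem.List.pyRepeat [(-1 : Int)] e, !s.2.1, s.2.2)
        else (s.1 ++ PySem.List.pyRepeat [s.2.2] e, !s.2.1, s.2.2 + 1))
      (ret, decide (i % 2 = 1), (((i + 1) / 2 : Nat) : Int))).1 = ret ++ pvRuns i l := by
  induction l with
  | nil => intro i ret; simp [pvRuns]
  | cons e rest ih =>
    intro i ret
    rcases Nat.even_or_odd i with ⟨k, hk⟩ | ⟨k, hk⟩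
    · subst hk
      have h1 : ¬ ((k + k) % 2 = 1) := by omega
      have h2 : (k + k + 1) % 2 = 1 := by omega
      have hb1 : (k + k + 1) / 2 = k := by omega
      have hb2 : (k + k + 1 + 1) / 2 = k + 1 := by omega
      have h4 : (k + k) / 2 = k := by omega
      rw [decide_eq_false h1, hb1]
      simp only [List.foldl_cons, Bool.false_eq_true, if_false, Bool.not_false]
      have hih := ih (k + k + 1) (ret ++ PySem.List.pyRepeat [((k : Nat) : Int)] e)
      rw [decide_eq_true h2, hb2] at hih
      rw [show ((k : Nat) : Int) + 1 = ((k + 1 : Nat) : Int) by push_cast; ring, hih]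
      simp [pvRuns, PySem.List.pyRepeat_singleton, h1, h4, List.append_assoc]
    · subst hk
      have h2 : (2 * k + 1) % 2 = 1 := by omega
      have h3 : ¬ ((2 * k + 1 + 1) % 2 = 1) := by omega
      have hb : (2 * k + 1 + 1) / 2 = (2 * k + 1 + 1 + 1) / 2 := by omega
      rw [decide_eq_true h2]
      simp only [List.foldl_cons, if_true, Bool.not_true]
      have hih := ih (2 * k + 1 + 1) (ret ++ PySem.List.pyRepeat [(-1 : Int)] e)
      rw [decide_eq_false h3, show (2 * k + 1 + 1 + 1) / 2 = (2 * k + 1 + 1) / 2 from hb.symm] at hih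
      rw [hih]
      simp [pvRuns, h2, PySem.List.pyRepeat_singleton, List.append_assoc]

-- B's emitted value at run index i, as pvRuns writes it
theorem pvVal_nat (i : Nat) :
    (if PySem.Int.mod (i : Int) 2 ≠ 0 then (-1 : Int) else PySem.Int.floordiv (i : Int) 2)
      = (if i % 2 = 1 then (-1 : Int) else ((i / 2 : Nat) : Int)) := by
  have hm : PySem.Int.mod (i : Int) 2 = ((i % 2 : Nat) : Int) := by
    exact_mod_cast PySem.Int.mod_natCast i 2
  have hd : PySem.Int.floordiv (i : Int) 2 = ((i / 2 : Nat) : Int) := by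
    exact_mod_cast PySem.Int.floordiv_natCast i 2
  rw [hm, hd]
  by_cases h : i % 2 = 1
  · simp [h]
  · have h0 : i % 2 = 0 := by omega
    simp [h0]

theorem pvFoldl_const {α β : Type} (f : α → α) : ∀ (xs : List β) (s : α),
    xs.foldl (fun a _ => f a) s = f^[xs.length] s := by
  intro xs
  induction xs with
  | nil => intro s; simp
  | cons x xs ih =>
    intro s
    simp [List.foldl_cons, ih, Function.iterate_succ_apply]

theorem pvFoldl_add_sum : ∀ (xs : List Int) (a : Int), xs.foldl (· + ·) a = a + xs.sum := by
  intro xs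
  induction xs with
  | nil => intro a; simp
  | cons x xs ih => intro a; simp [List.foldl_cons, ih]; ring

theorem pvS_nonneg (xs : List Int) : 0 ≤ pvS xs := by
  induction xs with
  | nil => simp [pvS]
  | cons x xs ih =>
    simp only [pvS, List.map_cons, List.sum_cons] at *
    have : 0 ≤ pvClamp x := by simp [pvClamp]; split_ifs with h <;> omega
    omega

-- a positive total means the list splits as nonpositive runs, then a positive run
theorem pvFirst_pos : ∀ (xs : List Int), 0 < pvS xs →
    ∃ zs v rest, xs = zs ++ v :: rest ∧ (∀ z ∈ zs, z ≤ 0) ∧ 0 < v := by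
  intro xs
  induction xs with
  | nil => intro h; simp [pvS] at h
  | cons e rest ih =>
    intro h
    by_cases he : 0 < e
    · exact ⟨[], e, rest, by simp, by simp, he⟩
    · have hc : pvClamp e = 0 := by simp [pvClamp]; omega
      have : 0 < pvS rest := by
        simp only [pvS, List.map_cons, List.sum_cons, hc, zero_add] at h ⊢; exact h
      obtain ⟨zs, v, r, hx, hz, hv⟩ := ih this
      exact ⟨e :: zs, v, r, by simp [hx], by
        intro z hzm
        rcases List.mem_cons.mp hzm with h1 | h1
        · omega
        · exact hz z h1, hv⟩

theorem pvRuns_zeros : ∀ (zs : List Int) (i : Nat) (rest : List Int),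
    (∀ z ∈ zs, z ≤ 0) → pvRuns i (zs ++ rest) = pvRuns (i + zs.length) rest := by
  intro zs
  induction zs with
  | nil => intro i rest _; simp
  | cons z zs ih =>
    intro i rest hz
    have hz0 : z.toNat = 0 := by have := hz z (by simp); omega
    simp only [List.cons_append, pvRuns, hz0, List.replicate_zero, List.nil_append]
    rw [ih (i + 1) rest (fun w hw => hz w (by simp [hw]))]
    congr 1
    simp [List.length_cons]; omega

theorem pvRuns_allzero : ∀ (xs : List Int) (i : Nat),
    (∀ z ∈ xs, z ≤ 0) → pvRuns i xs = [] := by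
  intro xs
  induction xs with
  | nil => intro i _; simp [pvRuns]
  | cons z zs ih =>
    intro i hz
    have hz0 : z.toNat = 0 := by have := hz z (by simp); omega
    simp [pvRuns, hz0, ih (i + 1) (fun w hw => hz w (by simp [hw]))]

theorem pvS_allzero (xs : List Int) (h : pvS xs ≤ 0) : ∀ z ∈ xs, z ≤ 0 := by
  induction xs with
  | nil => simp
  | cons e rest ih =>
    intro z hzm
    have hc : 0 ≤ pvClamp e := by simp [pvClamp]; split_ifs with hh <;> omega
    have hr : 0 ≤ pvS rest := pvS_nonneg rest
    have hsplit : pvS (e :: rest) = pvClamp e + pvS rest := by simp [pvS]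
    rcases List.mem_cons.mp hzm with h1 | h1
    · subst h1; by_contra hpos
      have : pvClamp z = z := by simp [pvClamp]; omega
      omega
    · exact ih (by omega) z h1

-- skip characterisation: m nonempty-zero runs, then a nonzero run of size v
theorem pvSkipB_char (sizes : List Int) : ∀ (m : Nat) (i : Nat) (fuel : Nat) (v : Int),
    (∀ j, j < m → sizes[i + j]? = some 0) → sizes[i + m]? = some v → v ≠ 0 → m < fuel →
    pvSkipB sizes ((i : Int) - 1) fuel = (((i + m : Nat) : Int), v) := by
  intro m
  induction m with
  | zero =>
    intro i fuel v _ hv hvne hf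
    obtain ⟨k, rfl⟩ : ∃ k, fuel = k + 1 := ⟨fuel - 1, by omega⟩
    simp only [pvSkipB]
    have : (i : Int) - 1 + 1 = (i : Int) := by ring
    rw [this, PySem.List.pyGet?_natCast]
    simp only [Nat.add_zero] at hv
    rw [hv]
    simp [hvne]
  | succ m ih =>
    intro i fuel v hz hv hvne hf
    obtain ⟨k, rfl⟩ : ∃ k, fuel = k + 1 := ⟨fuel - 1, by omega⟩
    simp only [pvSkipB]
    have : (i : Int) - 1 + 1 = (i : Int) := by ring
    rw [this, PySem.List.pyGet?_natCast]
    have h0 : sizes[i]? = some 0 := by have := hz 0 (by omega); simpa using this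
    rw [h0]
    simp only [if_true]
    have hstep := ih (i + 1) k v
      (fun j hj => by have := hz (j + 1) (by omega); simpa [Nat.add_assoc, Nat.add_comm 1 j] using this)
      (by simpa [Nat.add_assoc, Nat.add_comm 1 m] using hv) hvne (by omega)
    have hcast : ((i + 1 : Nat) : Int) - 1 = (i : Int) := by push_cast; ring
    rw [hcast] at hstep
    rw [hstep]
    congr 2
    omega

-- emitting the remaining fill of the current run, one block per iteration
theorem pvFill_run (sizes : List Int) (r : Int) : ∀ (n : Nat) (out : List Int),
    (pvStepB sizes)^[n] (out, r, (n : Int))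
      = (out ++ List.replicate n
          (if PySem.Int.mod r 2 ≠ 0 then (-1 : Int) else PySem.Int.floordiv r 2), r, 0) := by
  intro n
  induction n with
  | zero => intro out; simp
  | succ n ih =>
    intro out
    rw [Function.iterate_succ_apply]
    have h1' : ¬((n : Int) + 1 = 0) := by omega
    have hstep : pvStepB sizes (out, r, ((n + 1 : Nat) : Int))
        = (out ++ [if PySem.Int.mod r 2 ≠ 0 then (-1 : Int) else PySem.Int.floordiv r 2], r, (n : Int)) := by
      simp [pvStepB, h1']
    rw [hstep, ih]
    simp [List.replicate_succ, List.append_assoc]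

-- main two-pointer invariant: running (S of the suffix from i) iterations from a
-- fresh state (scan pointer at i, empty fill) appends exactly pvRuns i (suffix)
theorem pvMain (l : List Int) : ∀ (n : Nat) (i : Nat) (out : List Int),
    n = (pvS (l.drop i)).toNat →
    ∃ r', (pvStepB (l.map pvClamp))^[n] (out, (i : Int) - 1, 0)
            = (out ++ pvRuns i (l.drop i), r', 0) := by
  intro n
  induction n using Nat.strong_induction_on with
  | _ n ih =>
    intro i out hn
    rcases Nat.eq_zero_or_pos n with h0 | hpos
    · subst h0
      have hle : pvS (l.drop i) ≤ 0 := by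
        by_contra hgt
        have := pvS_nonneg (l.drop i)
        omega
      have hz := pvS_allzero (l.drop i) hle
      refine ⟨(i : Int) - 1, ?_⟩
      simp [pvRuns_allzero (l.drop i) i hz]
    · have hSpos : 0 < pvS (l.drop i) := by
        have := pvS_nonneg (l.drop i); omega
      obtain ⟨zs, v, rest, hx, hzs, hv⟩ := pvFirst_pos (l.drop i) hSpos
      set m := zs.length with hm
      -- index facts into sizes = l.map pvClamp
      have hgetj : ∀ j, j < m → (l.map pvClamp)[i + j]? = some 0 := by
        intro j hj
        have h1 : (l.drop i)[j]? = some zs[j] := by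
          rw [hx]
          rw [List.getElem?_append_left (by omega)]
          exact List.getElem?_eq_getElem hj
        have h2 : l[i + j]? = some zs[j] := by
          rw [← List.getElem?_drop]; exact h1
        have hzj : pvClamp zs[j] = 0 := by
          have := hzs zs[j] (List.getElem_mem hj)
          simp [pvClamp]; omega
        simp [List.getElem?_map, h2, hzj]
      have hgetm : (l.map pvClamp)[i + m]? = some v := by
        have h1 : (l.drop i)[m]? = some v := by
          rw [hx, List.getElem?_append_right (by omega)]
          simp [hm]
        have h2 : l[i + m]? = some v := by rw [← List.getElem?_drop]; exact h1
        have hcv : pvClamp v = v := by simp [pvClamp]; omega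
        simp [List.getElem?_map, h2, hcv]
      have hmlt : i + m < l.length := by
        have : l[i + m]? = some v := by
          have h1 : (l.drop i)[m]? = some v := by
            rw [hx, List.getElem?_append_right (by omega)]; simp [hm]
          rw [← List.getElem?_drop]; exact h1
        exact (List.getElem?_eq_some_iff.mp this).1
      have hfuel : m < (l.map pvClamp).length := by simp; omega
      -- one step: skip the zero runs and emit the first block of run i+m
      have hskip := pvSkipB_char (l.map pvClamp) m i (l.map pvClamp).length v hgetj hgetm (by omega) hfuel
      have hstep1 : pvStepB (l.map pvClamp) (out, (i : Int) - 1, 0)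
          = (out ++ [if PySem.Int.mod ((i + m : Nat) : Int) 2 ≠ 0 then (-1 : Int)
                     else PySem.Int.floordiv ((i + m : Nat) : Int) 2],
             ((i + m : Nat) : Int), v - 1) := by
        simp only [pvStepB, if_true, hskip]
      -- suffix decomposition bookkeeping
      have hdrop' : l.drop (i + m + 1) = rest := by
        have h1 : l.drop (i + m + 1) = (l.drop i).drop (m + 1) := by
          rw [List.drop_drop]
          try congr 1
          try omega
        have h2 : (zs ++ v :: rest).drop (m + 1) = rest := by
          have hc : zs ++ v :: rest = (zs ++ [v]) ++ rest := by simp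
          rw [hc, show m + 1 = (zs ++ [v]).length by simp [hm], List.drop_left]
        rw [h1, hx, h2]
      have hSsplit : pvS (l.drop i) = v + pvS rest := by
        rw [hx]
        simp only [pvS, List.map_append, List.sum_append, List.map_cons, List.sum_cons]
        have hz0 : (zs.map pvClamp).sum = 0 := by
          have : ∀ z ∈ zs.map pvClamp, z = 0 := by
            intro z hz
            obtain ⟨w, hw, rfl⟩ := List.mem_map.mp hz
            have := hzs w hw
            simp [pvClamp]; omega
          exact List.sum_eq_zero this
        have hcv : pvClamp v = v := by simp [pvClamp]; omega
        rw [hz0, hcv]; ring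
      have hrest0 : 0 ≤ pvS rest := pvS_nonneg rest
      have hn' : n = (pvS rest).toNat + (v - 1).toNat + 1 := by omega
      -- run the remaining v-1 blocks of run i+m
      have hfill := pvFill_run (l.map pvClamp) ((i + m : Nat) : Int) (v - 1).toNat
        (out ++ [if PySem.Int.mod ((i + m : Nat) : Int) 2 ≠ 0 then (-1 : Int)
                 else PySem.Int.floordiv ((i + m : Nat) : Int) 2])
      have hv1 : (((v - 1).toNat : Nat) : Int) = v - 1 := by omega
      rw [hv1] at hfill
      -- recursive call on the rest
      obtain ⟨r', hrec⟩ := ih (pvS rest).toNat (by omega) (i + m + 1)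
        (out ++ [if PySem.Int.mod ((i + m : Nat) : Int) 2 ≠ 0 then (-1 : Int)
                 else PySem.Int.floordiv ((i + m : Nat) : Int) 2]
             ++ List.replicate (v - 1).toNat
                 (if PySem.Int.mod ((i + m : Nat) : Int) 2 ≠ 0 then (-1 : Int)
                  else PySem.Int.floordiv ((i + m : Nat) : Int) 2))
        (by rw [hdrop'])
      refine ⟨r', ?_⟩
      rw [hn', Function.iterate_add_apply, Function.iterate_add_apply,
          Function.iterate_one, hstep1, hfill]
      have hcast : ((i + m + 1 : Nat) : Int) - 1 = ((i + m : Nat) : Int) := by push_cast; ring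
      rw [hcast] at hrec
      rw [hrec, hdrop']
      -- assemble the output lists
      rw [hx, pvRuns_zeros zs i (v :: rest) hzs]
      simp only [pvRuns, ← hm]
      rw [pvVal_nat (i + m)]
      have hrep : List.replicate v.toNat (if (i + m) % 2 = 1 then (-1 : Int) else (((i + m) / 2 : Nat) : Int))
          = (if (i + m) % 2 = 1 then (-1 : Int) else (((i + m) / 2 : Nat) : Int))
            :: List.replicate (v - 1).toNat (if (i + m) % 2 = 1 then (-1 : Int) else (((i + m) / 2 : Nat) : Int)) := by
        have : v.toNat = (v - 1).toNat + 1 := by omega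
        rw [this, List.replicate_succ]
      rw [hrep]
      simp [List.append_assoc]

theorem pvB_eq (l : List Int) : create_block_map_alt l = pvRuns 0 l := by
  unfold create_block_map_alt
  have hclamp : (fun e : Int => if e > 0 then e else 0) = pvClamp := rfl
  have htotal : (l.map pvClamp).foldl (· + ·) 0 = pvS l := by
    rw [pvFoldl_add_sum]
    simp [pvS]
  have hlen : (PySem.List.pyRange 0 (pvS l) 1).length = (pvS l).toNat := by
    rw [PySem.List.length_pyRange_one]; congr 1; ring
  obtain ⟨r', hB⟩ := pvMain l (pvS l).toNat 0 [] (by simp)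
  rw [hclamp]
  show (List.foldl (fun s _ => pvStepB (l.map pvClamp) s) ([], -1, 0)
        (PySem.List.pyRange 0 ((l.map pvClamp).foldl (· + ·) 0) 1)).1 = pvRuns 0 l
  rw [htotal, pvFoldl_const (pvStepB (l.map pvClamp)), hlen]
  have h0 : ((0 : Nat) : Int) - 1 = (-1 : Int) := by norm_num
  rw [← h0]
  simp only [List.drop_zero] at hB
  rw [hB]
  simp

-- ===== VERDICT (by name: the statement is the Claim_ definition above) =====
theorem create_block_map_spec : Claim_equal_create_block_map := by
  intro l _
  unfold Spec_create_block_map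
  rw [pvB_eq]
  unfold create_block_map
  have hA := pvA_loop l 0 []
  simpa using hA
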